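-- pv_equiv track=rewrite | github.com/abdifatahmohamad/Coding-Interview-Solutions | array_solutions/easy/number_69.py | summer_69
-- ===== SOURCE A (Python) =====
-- def summer_69(arr):
--     toSum = True
--     sum = 0
--     for x in arr:
--         if toSum:
--             if(x == 6):
--                 toSum = False
--             else:
--                 sum += x
--         else:
--             if(x == 9):
--                 toSum = True
--     return sum
-- ===== SOURCE B (Python) =====
-- def summer_69(arr):
--     i = 0
--     total = 0
--     n = len(arr)
--     while i < n:
--         x = arr[i]
--         if x == 6:
--             i += 1
--             while i < n and arr[i] != 9:
--                 i += 1
--             i += 1  # step past the 9 (or past the end if no 9 follows)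
--         else:
--             total += x
--             i += 1
--     return total
-- ===== Notes on version B (the rewrite author's own statement) =====
-- stated objective: alternative
-- what changed: Replaces the boolean toSum flag with an index-based traversal that consumes each 6..9 skip region in a nested inner loop, so no summing/not-summing state is carried.
import Mathlib
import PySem

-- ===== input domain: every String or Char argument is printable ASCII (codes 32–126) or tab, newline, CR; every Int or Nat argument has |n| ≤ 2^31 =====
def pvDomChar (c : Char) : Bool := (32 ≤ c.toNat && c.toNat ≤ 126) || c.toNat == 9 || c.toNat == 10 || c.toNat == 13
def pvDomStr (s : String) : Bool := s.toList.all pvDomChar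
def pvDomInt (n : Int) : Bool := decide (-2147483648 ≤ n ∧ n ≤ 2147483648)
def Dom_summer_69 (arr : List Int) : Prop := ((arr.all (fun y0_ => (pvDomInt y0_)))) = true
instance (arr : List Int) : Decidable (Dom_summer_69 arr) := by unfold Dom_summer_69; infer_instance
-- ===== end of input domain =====

-- B replaces A's boolean toSum flag with an index traversal that consumes each 6..9
-- skip region in a nested inner loop (objective: alternative decomposition, same cost).

-- ===== PORT A =====
-- A: single pass carrying (toSum, sum)
def summer_69 (arr : List Int) : Int :=
  (arr.foldl
    (fun (s : Bool × Int) x =>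
      if s.1 then
        if x = 6 then (false, s.2) else (true, s.2 + x)
      else
        if x = 9 then (true, s.2) else (false, s.2))
    (true, 0)).2

-- ===== PORT B =====
-- inner while of B: advance past elements until (and including) a 9; here, the
-- rest of the list after the skip region.
def pvSkipTo9 : List Int → List Int
  | [] => []
  | x :: xs => if x = 9 then xs else pvSkipTo9 xs

theorem pvSkipTo9_length_le : ∀ (xs : List Int), (pvSkipTo9 xs).length ≤ xs.length := by
  intro xs
  induction xs with
  | nil => simp [pvSkipTo9]
  | cons x xs ih => simp [pvSkipTo9]; split <;> omega

-- outer while of B: add each element; on a 6, hand the rest to the inner loop.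
def summer_69_alt (arr : List Int) : Int :=
  match arr with
  | [] => 0
  | x :: xs => if x = 6 then summer_69_alt (pvSkipTo9 xs) else x + summer_69_alt xs
termination_by arr.length
decreasing_by
  · simpa using Nat.lt_succ_of_le (pvSkipTo9_length_le xs)
  · simp

-- ===== PRECONDITION & SPEC =====
def Spec_summer_69 (arr : List Int) (out : Int) : Prop := out = summer_69_alt arr
instance (arr : List Int) (out : Int) : Decidable (Spec_summer_69 arr out) := by unfold Spec_summer_69; infer_instance

-- ===== CLAIM (what is proved, stated in full; the proofs are below) =====
def Claim_equal_summer_69 : Prop := ∀ (arr : List Int), Dom_summer_69 arr → Spec_summer_69 arr (summer_69 arr)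

-- ===== LEMMAS AND PROOFS =====
def pvStep : Bool × Int → Int → Bool × Int :=
  fun s x =>
    if s.1 then
      if x = 6 then (false, s.2) else (true, s.2 + x)
    else
      if x = 9 then (true, s.2) else (false, s.2)

theorem pvFold_char : ∀ (xs : List Int),
    (∀ s : Int, (xs.foldl pvStep (true, s)).2 = s + summer_69_alt xs) ∧
    (∀ s : Int, (xs.foldl pvStep (false, s)).2 = s + summer_69_alt (pvSkipTo9 xs)) := by
  intro xs
  induction xs with
  | nil => simp [summer_69_alt, pvSkipTo9]
  | cons x xs ih =>
    obtain ⟨ihT, ihF⟩ := ih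
    constructor
    · intro s
      by_cases h6 : x = 6
      · simp [pvStep, h6, summer_69_alt, ihF]
      · simp [pvStep, h6, summer_69_alt, ihT]
        ring
    · intro s
      by_cases h9 : x = 9
      · simp [pvStep, h9, pvSkipTo9, ihT]
      · simp [pvStep, h9, pvSkipTo9, ihF]

-- ===== VERDICT (by name: the statement is the Claim_ definition above) =====
theorem summer_69_spec : Claim_equal_summer_69 := by
  intro arr _
  unfold Spec_summer_69 summer_69
  have := (pvFold_char arr).1 0
  simpa [pvStep] using this
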